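-- pv_equiv track=rewrite | github.com/Zhang-Zhiyuan-zzy/hotpot | hotpot/cheminfo/graph.py | calc_electron_config
-- ===== SOURCE A (Python) =====
-- def calc_electron_config(atomic_number: int, length: int = 4) -> (int, list):
--     shells = [
--         [2],
--         [2, 6],
--         [2, 6],
--         [2, 10, 6],
--         [2, 10, 6],
--         [2, 14, 10, 6],
--         [2, 14, 10, 6],
--         [2, 18, 14, 10, 6],
--     ]
--     conf = []
--     _atomic_number = atomic_number
--
--     n = 0
--     l = 0
--     while _atomic_number > 0:
--         if l >= len(shells[n]):
--             n += 1
--             l = 0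
--             conf = []
--
--         if _atomic_number - shells[n][l] > 0:
--             conf.append(shells[n][l])
--         else:
--             conf.append(_atomic_number)
--
--         _atomic_number -= shells[n][l]
--         l += 1
--
--     return n, conf + [0] * (length - len(conf))
-- ===== SOURCE B (Python) =====
-- def calc_electron_config(atomic_number: int, length: int = 4) -> (int, list):
--     shells = [
--         [2],
--         [2, 6],
--         [2, 6],
--         [2, 10, 6],
--         [2, 10, 6],
--         [2, 14, 10, 6],
--         [2, 14, 10, 6],
--         [2, 18, 14, 10, 6],
--     ]
--     row_totals = [sum(r) for r in shells]
--     remaining = atomic_number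
--     n = 0
--     while remaining > row_totals[n]:
--         remaining -= row_totals[n]
--         n += 1
--     conf = []
--     for cap in shells[n]:
--         if remaining <= 0:
--             break
--         conf.append(cap if remaining - cap > 0 else remaining)
--         remaining -= cap
--     return n, conf + [0] * (length - len(conf))
-- ===== Notes on version B (the rewrite author's own statement) =====
-- stated objective: simpler
-- what changed: Replaces A's single stateful while-loop (which rebuilds and resets conf while walking cell by cell across rows) with two plain phases: subtract precomputed row totals to find the target row, then distribute the remainder across that one row.
import Mathlib
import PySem

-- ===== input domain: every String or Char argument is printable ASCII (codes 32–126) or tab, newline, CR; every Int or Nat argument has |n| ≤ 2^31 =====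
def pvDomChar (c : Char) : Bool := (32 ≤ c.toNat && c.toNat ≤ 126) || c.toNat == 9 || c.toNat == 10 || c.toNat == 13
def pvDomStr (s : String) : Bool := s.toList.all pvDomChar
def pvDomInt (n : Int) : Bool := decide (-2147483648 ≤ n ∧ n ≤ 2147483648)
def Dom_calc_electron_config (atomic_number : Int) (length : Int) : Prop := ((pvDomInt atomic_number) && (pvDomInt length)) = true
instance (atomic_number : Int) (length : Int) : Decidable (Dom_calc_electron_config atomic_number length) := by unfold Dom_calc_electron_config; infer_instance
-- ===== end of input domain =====

-- B re-decomposes A's single stateful while-loop (with its row-reset of conf) into two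
-- plain phases: locate the row via precomputed row totals, then distribute the remainder
-- across that one row; objective: simpler. Return values agree on all inputs where A
-- returns (atomic_number ≤ 168); above that both Pythons raise IndexError.

-- ===== PORT A =====
def pvShells : List (List Int) :=
  [[2], [2, 6], [2, 6], [2, 10, 6], [2, 10, 6], [2, 14, 10, 6], [2, 14, 10, 6], [2, 18, 14, 10, 6]]

-- while _atomic_number > 0: … ; fuel bounds the iterations (each subtracts a positive cap);
-- `none` from pyGet? is Python's IndexError (outside Pre_).
def pvLoopA (fuel : Nat) (a n l : Int) (conf : List Int) : Int × List Int :=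
  match fuel with
  | 0 => (n, conf)
  | fuel + 1 =>
    if a > 0 then
      match PySem.List.pyGet? pvShells n with
      | none => (n, conf)
      | some row0 =>
        let s : Int × Int × List Int :=
          if l ≥ (row0.length : Int) then (n + 1, 0, []) else (n, l, conf)
        match PySem.List.pyGet? pvShells s.1 with
        | none => (s.1, s.2.2)
        | some row =>
          match PySem.List.pyGet? row s.2.1 with
          | none => (s.1, s.2.2)
          | some cap =>
            pvLoopA fuel (a - cap) s.1 (s.2.1 + 1)
              (s.2.2 ++ [if a - cap > 0 then cap else a])
    else (n, conf)

def pvCoreA (a : Int) : Int × List Int := pvLoopA (a.toNat + 1) a 0 0 []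

def calc_electron_config (atomic_number : Int) (length : Int) : Int × List Int :=
  let p := pvCoreA atomic_number
  (p.1, p.2 ++ List.replicate (length - p.2.length).toNat 0)

-- ===== PORT B =====
def pvRowTotals : List Int := pvShells.map (fun r => r.foldl (· + ·) 0)

-- while remaining > row_totals[n]: …
def pvFindRow (fuel : Nat) (remaining n : Int) : Int × Int :=
  match fuel with
  | 0 => (remaining, n)
  | fuel + 1 =>
    match PySem.List.pyGet? pvRowTotals n with
    | none => (remaining, n)
    | some t => if remaining > t then pvFindRow fuel (remaining - t) (n + 1) else (remaining, n)

-- for cap in shells[n]: break if remaining <= 0; append …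
def pvDistribute (row : List Int) (remaining : Int) : List Int :=
  match row with
  | [] => []
  | cap :: rest =>
    if remaining ≤ 0 then []
    else (if remaining - cap > 0 then cap else remaining) :: pvDistribute rest (remaining - cap)

def pvCoreB (a : Int) : Int × List Int :=
  let p := pvFindRow 9 a 0
  let conf :=
    match PySem.List.pyGet? pvShells p.2 with
    | none => []
    | some row => pvDistribute row p.1
  (p.2, conf)

def calc_electron_config_alt (atomic_number : Int) (length : Int) : Int × List Int :=
  let p := pvCoreB atomic_number
  (p.1, p.2 ++ List.replicate (length - p.2.length).toNat 0)

-- ===== PRECONDITION & SPEC =====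
-- Pre_ excludes exactly atomic_number > 168 (more than all shells hold), where the
-- Python A raises IndexError (and B raises the same).
def Pre_calc_electron_config (atomic_number : Int) (length : Int) : Prop := atomic_number ≤ 168
instance (atomic_number : Int) (length : Int) : Decidable (Pre_calc_electron_config atomic_number length) := by unfold Pre_calc_electron_config; infer_instance

def pvWitness_calc_electron_config : Int × Int := (26, 4)

def Spec_calc_electron_config (atomic_number : Int) (length : Int) (out : Int × List Int) : Prop := out = calc_electron_config_alt atomic_number length
instance (atomic_number : Int) (length : Int) (out : Int × List Int) : Decidable (Spec_calc_electron_config atomic_number length out) := by unfold Spec_calc_electron_config; infer_instance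

-- ===== CLAIM (what is proved, stated in full; the proofs are below) =====
def Claim_equal_calc_electron_config : Prop := ∀ (atomic_number : Int) (length : Int), Dom_calc_electron_config atomic_number length → Pre_calc_electron_config atomic_number length → Spec_calc_electron_config atomic_number length (calc_electron_config atomic_number length)

-- ===== LEMMAS AND PROOFS =====

lemma pvCoreA_nonpos (a : Int) (h : a ≤ 0) : pvCoreA a = (0, []) := by
  have hn : ¬ a > 0 := by omega
  simp [pvCoreA, pvLoopA, hn]

lemma pvCoreB_nonpos (a : Int) (h : a ≤ 0) : pvCoreB a = (0, []) := by
  have h2 : ¬ a > (2 : Int) := by omega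
  simp [pvCoreB, pvFindRow, pvRowTotals, pvShells, PySem.List.pyGet?, PySem.List.pyIdx?, h2,
        pvDistribute, h]

set_option maxRecDepth 4000 in
lemma pvCore_pos_nat : ∀ k ∈ Finset.Icc (1 : Nat) 168, pvCoreA (k : Int) = pvCoreB (k : Int) := by decide

lemma pvCore_eq (a : Int) (h : a ≤ 168) : pvCoreA a = pvCoreB a := by
  by_cases hp : a ≤ 0
  · rw [pvCoreA_nonpos a hp, pvCoreB_nonpos a hp]
  · have h1 : 1 ≤ a := by omega
    have ha : a = ((a.toNat : Nat) : Int) := by omega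
    have hm : a.toNat ∈ Finset.Icc 1 168 := by
      simp [Finset.mem_Icc]; omega
    rw [ha]; exact pvCore_pos_nat a.toNat hm

-- ===== VERDICT (by name: the statement is the Claim_ definition above) =====
theorem calc_electron_config_spec : Claim_equal_calc_electron_config := by
  intro a l _ hpre
  unfold Spec_calc_electron_config calc_electron_config calc_electron_config_alt
  rw [pvCore_eq a hpre]
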